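-- pv_equiv track=rewrite | github.com/SkyTemple/skytemple | skytemple/module/moves_items/controller/item_lists.py | _calculate_relative_weights
-- ===== SOURCE A (Python) =====
-- from typing import TYPE_CHECKING, Dict, List, Optional, cast
-- from functools import reduce
-- from math import gcd
--
-- def _calculate_relative_weights(list_of_weights: List[int]) -> List[int]:
--     weights = []
--     if len(list_of_weights) < 1:
--         return []
--     for i in range(0, len(list_of_weights)):
--         weight = list_of_weights[i]
--         if weight != 0:
--             last_nonzero = i - 1
--             while last_nonzero >= 0 and list_of_weights[last_nonzero] == 0:
--                 last_nonzero -= 1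
--             if last_nonzero != -1:
--                 weight -= list_of_weights[last_nonzero]
--         weights.append(weight)
--     weights_nonzero = [w for w in weights if w != 0]
--     weights_gcd = 1
--     if len(weights_nonzero) > 0:
--         weights_gcd = reduce(gcd, weights_nonzero)
--     return [int(w / weights_gcd) for w in weights]
-- ===== SOURCE B (Python) =====
-- from math import gcd
--
-- def _calculate_relative_weights(list_of_weights):
--     # One pass: carry the value of the last nonzero entry seen so far (prev)
--     # and fold the gcd of the nonzero diffs as they are produced.
--     diffs = []
--     prev = 0
--     g = None
--     for w in list_of_weights:
--         if w == 0:
--             diffs.append(0)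
--         else:
--             d = w - prev
--             prev = w
--             diffs.append(d)
--             if d != 0:
--                 g = d if g is None else gcd(g, d)
--     if g is None:
--         g = 1
--     return [d // g for d in diffs]
-- ===== Notes on version B (the rewrite author's own statement) =====
-- stated objective: alternative
-- what changed: Replaces A's per-index backward rescan for the previous nonzero entry by a single forward pass that carries the last nonzero value and folds the gcd of the nonzero diffs as they are produced.
import Mathlib
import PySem

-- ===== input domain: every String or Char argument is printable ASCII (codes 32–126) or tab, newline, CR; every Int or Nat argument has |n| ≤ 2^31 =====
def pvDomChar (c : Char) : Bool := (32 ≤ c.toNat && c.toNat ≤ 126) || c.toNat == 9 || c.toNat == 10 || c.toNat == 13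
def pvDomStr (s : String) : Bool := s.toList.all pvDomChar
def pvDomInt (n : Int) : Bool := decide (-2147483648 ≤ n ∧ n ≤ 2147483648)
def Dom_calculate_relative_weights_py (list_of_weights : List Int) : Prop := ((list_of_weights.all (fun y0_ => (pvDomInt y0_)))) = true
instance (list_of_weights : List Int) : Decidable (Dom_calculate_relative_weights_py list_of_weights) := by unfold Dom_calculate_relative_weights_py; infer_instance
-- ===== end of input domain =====

-- B replaces A's per-index backward rescan for the previous nonzero entry by a single
-- forward pass carrying the last nonzero value and folding the gcd as diffs are produced.

-- ===== PORT A =====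
-- the inner `while last_nonzero >= 0 and list_of_weights[last_nonzero] == 0: last_nonzero -= 1`
-- loop, started at i-1: argument is i, result is the final value of last_nonzero
def pvLastNZ (l : List Int) : Nat → Int
  | 0 => -1
  | n + 1 => if l.getD n 0 = 0 then pvLastNZ l n else (n : Int)

def calculate_relative_weights_py (list_of_weights : List Int) : List Int :=
  if list_of_weights.length < 1 then [] else
  let weights := (List.range list_of_weights.length).map (fun i =>
    let weight := list_of_weights.getD i 0
    if weight ≠ 0 then
      let last_nonzero := pvLastNZ list_of_weights i
      if last_nonzero ≠ -1 then weight - list_of_weights.getD last_nonzero.toNat 0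
      else weight
    else weight)
  let weights_nonzero := weights.filter (fun w => w ≠ 0)
  let weights_gcd : Int :=
    match weights_nonzero with    -- reduce(gcd, weights_nonzero), seeded by the first element
    | [] => 1
    | a :: rest => rest.foldl (fun x y => ((Int.gcd x y : Nat) : Int)) a
  -- int(w / weights_gcd): the division is exact here (the gcd divides every weight),
  -- so truncating division (tdiv) is what the Python float division + int() computes
  weights.map (fun w => w.tdiv weights_gcd)

-- ===== PORT B =====
def calculate_relative_weights_py_alt (list_of_weights : List Int) : List Int :=
  let st := list_of_weights.foldl
    (fun (st : List Int × Int × Option Int) w =>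
      let diffs := st.1; let prev := st.2.1; let g := st.2.2
      if w = 0 then (diffs ++ [0], prev, g)
      else
        let d := w - prev
        let g' := if d ≠ 0 then
            (match g with
             | none => some d
             | some x => some ((Int.gcd x d : Nat) : Int))
          else g
        (diffs ++ [d], w, g'))
    ([], 0, none)
  let g := st.2.2.getD 1
  st.1.map (fun d => d.fdiv g)   -- d // g

-- ===== PRECONDITION & SPEC =====
def Spec_calculate_relative_weights_py (list_of_weights : List Int) (out : List Int) : Prop := out = calculate_relative_weights_py_alt list_of_weights
instance (list_of_weights : List Int) (out : List Int) : Decidable (Spec_calculate_relative_weights_py list_of_weights out) := by unfold Spec_calculate_relative_weights_py; infer_instance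

-- ===== CLAIM (what is proved, stated in full; the proofs are below) =====
def Claim_equal_calculate_relative_weights_py : Prop := ∀ (list_of_weights : List Int), Dom_calculate_relative_weights_py list_of_weights → Spec_calculate_relative_weights_py list_of_weights (calculate_relative_weights_py list_of_weights)

-- ===== LEMMAS AND PROOFS =====

-- common specification: list of diffs against the last nonzero value (prev = seed)
def pvWdiff (prev : Int) : List Int → List Int
  | [] => []
  | w :: ws => if w = 0 then 0 :: pvWdiff prev ws else (w - prev) :: pvWdiff w ws

def pvGcd (x y : Int) : Int := ((Int.gcd x y : Nat) : Int)

def pvGstep (g : Option Int) (d : Int) : Option Int :=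
  if d = 0 then g else
    match g with
    | none => some d
    | some x => some (pvGcd x d)

def pvPfold (prev : Int) (L : List Int) : Int := L.foldl (fun p w => if w = 0 then p else w) prev

-- value of the last nonzero entry strictly before index i (prev if none)
def pvPv (prev : Int) (L : List Int) (i : Nat) : Int :=
  if pvLastNZ L i = -1 then prev else L.getD (pvLastNZ L i).toNat 0

theorem pvWdiff_length (prev : Int) (L : List Int) : (pvWdiff prev L).length = L.length := by
  induction L generalizing prev with
  | nil => rfl
  | cons w ws ih => by_cases h : w = 0 <;> simp [pvWdiff, h, ih]

theorem pvLastNZ_nonneg_or (L : List Int) (n : Nat) :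
    pvLastNZ L n = -1 ∨ 0 ≤ pvLastNZ L n := by
  induction n with
  | zero => left; rfl
  | succ n ih =>
    by_cases h : L.getD n 0 = 0
    · rw [show pvLastNZ L (n + 1) = if L.getD n 0 = 0 then pvLastNZ L n else (n : Int) from rfl,
        if_pos h]
      exact ih
    · rw [show pvLastNZ L (n + 1) = if L.getD n 0 = 0 then pvLastNZ L n else (n : Int) from rfl,
        if_neg h]
      right; exact Int.natCast_nonneg n

theorem pvLastNZ_cons (w : Int) (ws : List Int) (n : Nat) :
    pvLastNZ (w :: ws) (n + 1) =
      if pvLastNZ ws n = -1 then (if w = 0 then -1 else 0) else pvLastNZ ws n + 1 := by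
  have pvstep : ∀ (l : List Int) (m : Nat),
      pvLastNZ l (m + 1) = if l.getD m 0 = 0 then pvLastNZ l m else (m : Int) := fun _ _ => rfl
  induction n with
  | zero => by_cases h : w = 0 <;> simp [pvLastNZ, h]
  | succ n ih =>
    have h1 : (w :: ws).getD (n + 1) 0 = ws.getD n 0 := rfl
    rw [pvstep (w :: ws) (n + 1), pvstep ws n, h1]
    by_cases h : ws.getD n 0 = 0
    · rw [if_pos h, if_pos h]; exact ih
    · rw [if_neg h, if_neg h]
      have hne : ¬((n : Int) = -1) := by omega
      rw [if_neg hne]; omega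

theorem pvPv_cons (prev w : Int) (ws : List Int) (j : Nat) :
    pvPv prev (w :: ws) (j + 1) = pvPv (if w = 0 then prev else w) ws j := by
  unfold pvPv
  rw [pvLastNZ_cons]
  rcases pvLastNZ_nonneg_or ws j with h | h
  · by_cases hw : w = 0 <;> simp [h, hw]
  · have hne : pvLastNZ ws j ≠ -1 := by omega
    have ht : (pvLastNZ ws j + 1).toNat = (pvLastNZ ws j).toNat + 1 := by omega
    have hne2 : pvLastNZ ws j + 1 ≠ -1 := by omega
    simp [hne, hne2, ht]

theorem pvWdiff_getD (L : List Int) (prev : Int) (i : Nat) (hi : i < L.length) :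
    (pvWdiff prev L).getD i 0 =
      if L.getD i 0 = 0 then 0 else L.getD i 0 - pvPv prev L i := by
  induction L generalizing prev i with
  | nil => simp at hi
  | cons w ws ih =>
    cases i with
    | zero =>
      have : pvPv prev (w :: ws) 0 = prev := rfl
      by_cases h : w = 0 <;> simp [pvWdiff, h, this]
    | succ j =>
      have hj : j < ws.length := by simpa using hi
      rw [pvPv_cons]
      by_cases h : w = 0
      · simpa [pvWdiff, h] using ih (if w = 0 then prev else w) j hj
      · simpa [pvWdiff, h] using ih (if w = 0 then prev else w) j hj

-- A's weights list is pvWdiff 0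
theorem pvA_weights (L : List Int) :
    (List.range L.length).map (fun i =>
      let weight := L.getD i 0
      if weight ≠ 0 then
        let last_nonzero := pvLastNZ L i
        if last_nonzero ≠ -1 then weight - L.getD last_nonzero.toNat 0
        else weight
      else weight) = pvWdiff 0 L := by
  apply List.ext_getElem
  · simp [pvWdiff_length]
  · intro i h1 h2
    have hi : i < L.length := by simpa using h1
    have hget : (pvWdiff 0 L)[i] = (pvWdiff 0 L).getD i 0 := (List.getD_eq_getElem _ _ h2).symm
    rw [hget, pvWdiff_getD L 0 i hi]
    simp only [List.getElem_map, List.getElem_range]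
    by_cases h : L.getD i 0 = 0 <;>
      [skip; by_cases hn : pvLastNZ L i = -1] <;>
      · simp only [List.getD_eq_getElem?_getD] at h
        simp_all [pvPv, List.getD_eq_getElem?_getD]

-- B's loop computes (diffs ++ pvWdiff prev L, last nonzero value, gcd fold)
theorem pvB_loop (L : List Int) (diffs : List Int) (prev : Int) (g : Option Int) :
    L.foldl
      (fun (st : List Int × Int × Option Int) w =>
        let diffs := st.1; let prev := st.2.1; let g := st.2.2
        if w = 0 then (diffs ++ [0], prev, g)
        else
          let d := w - prev
          let g' := if d ≠ 0 then
              (match g with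
               | none => some d
               | some x => some ((Int.gcd x d : Nat) : Int))
            else g
          (diffs ++ [d], w, g'))
      (diffs, prev, g)
    = (diffs ++ pvWdiff prev L, pvPfold prev L, (pvWdiff prev L).foldl pvGstep g) := by
  induction L generalizing diffs prev g with
  | nil => simp [pvWdiff, pvPfold]
  | cons w ws ih =>
    by_cases h : w = 0
    · simp only [List.foldl_cons, if_pos h]
      rw [ih]
      simp [pvWdiff, h, pvPfold, pvGstep]
    · simp only [List.foldl_cons, if_neg h]
      rw [ih]
      by_cases hd : w - prev = 0
      · simp [pvWdiff, h, hd, pvPfold, pvGstep]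
      · simp [pvWdiff, h, hd, pvPfold, pvGstep, pvGcd]

-- gcd folds: B's option-seeded fold equals A's reduce over the nonzero filter
theorem pvGstep_some (W : List Int) (x : Int) :
    W.foldl pvGstep (some x) = some ((W.filter (fun w => w ≠ 0)).foldl pvGcd x) := by
  induction W generalizing x with
  | nil => rfl
  | cons a rest ih =>
    by_cases h : a = 0
    · simp [pvGstep, h, ih]
    · simp [pvGstep, h, ih]

theorem pvGstep_none (W : List Int) :
    (W.foldl pvGstep none).getD 1 =
      (match W.filter (fun w => w ≠ 0) with
       | [] => (1 : Int)
       | a :: rest => rest.foldl pvGcd a) := by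
  induction W with
  | nil => rfl
  | cons a rest ih =>
    by_cases h : a = 0
    · simpa [pvGstep, h] using ih
    · simp [pvGstep, h, pvGstep_some]

-- the reduce-gcd divides every element it was folded over
theorem pvFold_gcd_dvd_seed (rest : List Int) (a : Int) : rest.foldl pvGcd a ∣ a := by
  induction rest generalizing a with
  | nil => exact dvd_refl a
  | cons b rest ih => exact dvd_trans (ih (pvGcd a b)) (Int.gcd_dvd_left a b)

theorem pvFold_gcd_dvd (rest : List Int) (a x : Int) (hx : x ∈ a :: rest) :
    rest.foldl pvGcd a ∣ x := by
  induction rest generalizing a with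
  | nil => simp at hx; simp [hx]
  | cons b rest ih =>
    have hfold : rest.foldl pvGcd (pvGcd a b) ∣ pvGcd a b :=
      pvFold_gcd_dvd_seed rest (pvGcd a b)
    have hla : (b :: rest).foldl pvGcd a = rest.foldl pvGcd (pvGcd a b) := rfl
    rw [hla]
    rcases List.mem_cons.mp hx with rfl | hx2
    · exact dvd_trans hfold (Int.gcd_dvd_left x b)
    · rcases List.mem_cons.mp hx2 with rfl | hx3
      · exact dvd_trans hfold (Int.gcd_dvd_right a x)
      · exact ih (pvGcd a b) (List.mem_cons_of_mem _ hx3)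

-- ===== VERDICT (by name: the statement is the Claim_ definition above) =====
theorem calculate_relative_weights_py_spec : Claim_equal_calculate_relative_weights_py := by
  unfold Claim_equal_calculate_relative_weights_py
  intro L _
  unfold Spec_calculate_relative_weights_py
  unfold calculate_relative_weights_py calculate_relative_weights_py_alt
  rw [pvB_loop, pvA_weights]
  by_cases hL : L.length < 1
  · have : L = [] := by cases L <;> simp_all
    subst this; rfl
  · have hg : (fun x y : Int => ((Int.gcd x y : Nat) : Int)) = pvGcd := rfl
    simp only [if_neg hL, List.nil_append, pvGstep_none, hg]
    rcases hfe : (pvWdiff 0 L).filter (fun w => w ≠ 0) with _ | ⟨a, rest⟩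
    · rw [hfe]
      simp [Int.tdiv_one, Int.fdiv_one]
    · rw [hfe]
      apply List.map_congr_left
      intro w hw
      have hdvd : rest.foldl pvGcd a ∣ w := by
        by_cases hw0 : w = 0
        · subst hw0; exact dvd_zero _
        · exact pvFold_gcd_dvd rest a w
            (hfe ▸ List.mem_filter.mpr ⟨hw, by simpa using hw0⟩)
      show w.tdiv (rest.foldl pvGcd a) = w.fdiv (rest.foldl pvGcd a)
      rw [Int.tdiv_eq_ediv_of_dvd hdvd, Int.fdiv_eq_ediv_of_dvd hdvd]
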